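-- pv_equiv track=rewrite | github.com/Firstmobital/dealership-ai-platform | scripts/reconcile_ai_handler_from_docs_reference.py | extract_prelude
-- ===== SOURCE A (Python) =====
-- def extract_prelude(lines: list[str]) -> str:
--     out: list[str] = []
--     i = 0
--     in_import = False
--
--     while i < len(lines):
--         line = lines[i]
--         stripped = line.strip()
--
--         if in_import:
--             out.append(line)
--             if stripped.endswith(";"):
--                 in_import = False
--             i += 1
--             continue
--
--         if stripped.startswith("/// <reference path="):
--             out.append(line)
--             i += 1
--             continue
--
--         if line.lstrip().startswith("import "):
--             out.append(line)
--             if not stripped.endswith(";"):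
--                 in_import = True
--             i += 1
--             continue
--
--         if stripped == "":
--             out.append(line)
--             i += 1
--             continue
--
--         break
--
--     return "".join(out)
-- ===== SOURCE B (Python) =====
-- def _chunks(lines):
--     """Group the line list into statements: an import line without a trailing
--     ';' absorbs following lines up to and including the first one ending in ';'
--     (or to the end of file); every other line is a statement of its own."""
--     chunks = []
--     i = 0
--     n = len(lines)
--     while i < n:
--         line = lines[i]
--         i += 1
--         chunk = [line]
--         if line.lstrip().startswith("import ") and not line.strip().endswith(";"):
--             while i < n:
--                 chunk.append(lines[i])
--                 i += 1
--                 if chunk[-1].strip().endswith(";"):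
--                     break
--         chunks.append(chunk)
--     return chunks
--
--
-- def _is_prelude_head(line):
--     s = line.strip()
--     return (s.startswith("/// <reference path=")
--             or line.lstrip().startswith("import ")
--             or s == "")
--
--
-- def extract_prelude(lines: list[str]) -> str:
--     out = []
--     for chunk in _chunks(lines):
--         if not _is_prelude_head(chunk[0]):
--             break
--         out.extend(chunk)
--     return "".join(out)
-- ===== Notes on version B (the rewrite author's own statement) =====
-- stated objective: alternative
-- what changed: B first groups the whole file into multi-line statement chunks (an unterminated import absorbs its continuation lines), then takes chunks while their head line classifies as prelude and joins them, instead of A's single index-driven scan with an in_import flag.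
import Mathlib
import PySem

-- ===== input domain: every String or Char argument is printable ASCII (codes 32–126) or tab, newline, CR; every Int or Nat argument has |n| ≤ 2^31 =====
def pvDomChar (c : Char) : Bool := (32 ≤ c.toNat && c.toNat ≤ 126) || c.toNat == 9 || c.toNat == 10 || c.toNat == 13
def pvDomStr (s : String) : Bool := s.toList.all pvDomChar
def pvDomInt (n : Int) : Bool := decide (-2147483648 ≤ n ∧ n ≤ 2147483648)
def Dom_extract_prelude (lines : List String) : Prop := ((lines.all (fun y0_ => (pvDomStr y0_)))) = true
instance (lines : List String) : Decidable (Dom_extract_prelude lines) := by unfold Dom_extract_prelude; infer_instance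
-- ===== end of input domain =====

-- B groups the file into multi-line statement chunks first, then takes prelude chunks
-- and joins them (objective: alternative decomposition); same O(n) cost, same value.

-- ===== PORT A =====
-- While-loop over index i with the in_import flag, transliterated as structural
-- recursion on the remaining lines carrying the flag.
def extract_prelude_goA (lines : List String) (in_import : Bool) : List String :=
  match lines with
  | [] => []
  | line :: rest =>
    let stripped := PySem.Str.strip line
    if in_import then
      line :: extract_prelude_goA rest (!(PySem.Str.endswith stripped ";"))
    else if PySem.Str.startswith stripped "/// <reference path=" then
      line :: extract_prelude_goA rest false
    else if PySem.Str.startswith (PySem.Str.lstrip line) "import " then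
      line :: extract_prelude_goA rest (!(PySem.Str.endswith stripped ";"))
    else if stripped == "" then
      line :: extract_prelude_goA rest false
    else []

def extract_prelude (lines : List String) : String :=
  PySem.Str.join "" (extract_prelude_goA lines false)

-- ===== PORT B =====
-- Source B _chunks inner while-loop: absorb lines up to and including the first one
-- whose strip ends in ";"; returns (absorbed lines, remaining lines).
def bp_absorb (lines : List String) : List String × List String :=
  match lines with
  | [] => ([], [])
  | cont :: rest =>
    if PySem.Str.endswith (PySem.Str.strip cont) ";" then ([cont], rest)
    else
      let p := bp_absorb rest
      (cont :: p.1, p.2)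

theorem bp_absorb_len (lines : List String) :
    (bp_absorb lines).2.length ≤ lines.length := by
  induction lines with
  | nil => simp [bp_absorb]
  | cons c rest ih =>
    simp only [bp_absorb]
    split
    · simp
    · simpa using Nat.le_succ_of_le ih

-- Source B _chunks: group the whole line list into statement chunks.
def bp_chunks (lines : List String) : List (List String) :=
  match lines with
  | [] => []
  | line :: rest =>
    if PySem.Str.startswith (PySem.Str.lstrip line) "import "
        && !(PySem.Str.endswith (PySem.Str.strip line) ";") then
      let p := bp_absorb rest
      (line :: p.1) :: bp_chunks p.2
    else
      [line] :: bp_chunks rest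
termination_by lines.length
decreasing_by
  · exact Nat.lt_succ_of_le (bp_absorb_len rest)
  · simp

-- Source B _is_prelude_head
def bp_is_prelude_head (line : String) : Bool :=
  let s := PySem.Str.strip line
  PySem.Str.startswith s "/// <reference path="
    || PySem.Str.startswith (PySem.Str.lstrip line) "import "
    || s == ""

-- Source B main loop: take chunks while their head is a prelude line, flattening.
def bp_take (chunks : List (List String)) : List String :=
  match chunks with
  | [] => []
  | ch :: rest =>
    if bp_is_prelude_head (ch.headD "") then ch ++ bp_take rest else []

def extract_prelude_alt (lines : List String) : String :=
  PySem.Str.join "" (bp_take (bp_chunks lines))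

-- ===== PRECONDITION & SPEC =====
def Spec_extract_prelude (lines : List String) (out : String) : Prop := out = extract_prelude_alt lines
instance (lines : List String) (out : String) : Decidable (Spec_extract_prelude lines out) := by unfold Spec_extract_prelude; infer_instance

-- ===== CLAIM =====
def Claim_equal_extract_prelude : Prop := ∀ (lines : List String), Dom_extract_prelude lines → Spec_extract_prelude lines (extract_prelude lines)

-- ===== LEMMAS AND PROOFS =====
-- rstrip keeps a non-space head.
theorem rstrip_head (c : Char) (hc : PySem.Chars.isspace c = false) (t : List Char) :
    ∃ u, PySem.Chars.rstrip (c :: t) = c :: u := by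
  simp only [PySem.Chars.rstrip]
  rw [show (c :: t).reverse = t.reverse ++ [c] by simp]
  rw [List.dropWhile_append]
  split
  · exact ⟨[], by simp [hc]⟩
  · exact ⟨(List.dropWhile (fun c => PySem.Chars.isspace c) t.reverse).reverse,
      by simp⟩

-- A line whose strip starts with "/// <reference path=" cannot have an lstrip
-- starting with "import ".
theorem ref_not_import (line : String) :
    PySem.Str.startswith (PySem.Str.strip line) "/// <reference path=" = true →
    PySem.Str.startswith (PySem.Str.lstrip line) "import " = false := by
  simp only [PySem.Str.startswith_eq, PySem.Str.toList_strip, PySem.Str.toList_lstrip]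
  intro h
  by_contra hb
  rw [Bool.not_eq_false, PySem.Chars.startswith_iff] at hb
  rw [PySem.Chars.startswith_iff] at h
  have hstrip : PySem.Chars.strip line.toList = PySem.Chars.rstrip (PySem.Chars.lstrip line.toList) := by
    simp [PySem.Chars.strip, PySem.Chars.rstrip, PySem.Chars.lstrip]
  obtain ⟨t, ht⟩ := hb
  have e1 : "import ".toList = 'i' :: "mport ".toList := by decide
  rw [e1, List.cons_append] at ht
  obtain ⟨u, hu⟩ := rstrip_head 'i' (by decide) ("mport ".toList ++ t)
  rw [hstrip, ← ht, hu] at h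
  obtain ⟨v, hv⟩ := h
  have e2 : "/// <reference path=".toList = '/' :: "// <reference path=".toList := by decide
  rw [e2, List.cons_append] at hv
  simp at hv

-- the cons equation of the chunker (it is well-founded, so cite this, not simp)
theorem bp_chunks_cons (line : String) (rest : List String) :
    bp_chunks (line :: rest) =
      if PySem.Str.startswith (PySem.Str.lstrip line) "import "
          && !(PySem.Str.endswith (PySem.Str.strip line) ";") then
        (line :: (bp_absorb rest).1) :: bp_chunks (bp_absorb rest).2
      else
        [line] :: bp_chunks rest := by
  rw [bp_chunks]

theorem bp_take_cons (ch : List String) (rest : List (List String)) :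
    bp_take (ch :: rest) =
      if bp_is_prelude_head (ch.headD "") then ch ++ bp_take rest else [] := rfl

-- A's in_import = true state equals B's absorption of continuation lines.
theorem goA_true_eq (lines : List String) :
    extract_prelude_goA lines true =
      (bp_absorb lines).1 ++ extract_prelude_goA (bp_absorb lines).2 false := by
  induction lines with
  | nil => simp [extract_prelude_goA, bp_absorb]
  | cons c rest ih =>
    simp only [extract_prelude_goA, bp_absorb, if_true]
    split_ifs with h
    · rw [h]; simp
    · rw [Bool.not_eq_true] at h; rw [h]; simp [ih]

theorem goA_false_eq (lines : List String) :
    extract_prelude_goA lines false = bp_take (bp_chunks lines) := by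
  induction hn : lines.length using Nat.strong_induction_on generalizing lines with
  | _ n ih =>
  match lines with
  | [] => simp [extract_prelude_goA, bp_chunks, bp_take]
  | line :: rest =>
    subst hn
    simp only [extract_prelude_goA, Bool.false_eq_true, if_false]
    split_ifs with h1 h2 h3
    · -- reference line: B makes a singleton chunk (ref_not_import rules out absorption)
      rw [bp_chunks_cons, ref_not_import line h1, if_neg (by simp), bp_take_cons,
        if_pos (by simp only [bp_is_prelude_head, List.headD, Bool.or_eq_true]; exact Or.inl (Or.inl h1)),
        List.singleton_append]
      exact congrArg _ (ih rest.length (by simp) rest rfl)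
    · -- import line
      by_cases h3 : PySem.Str.endswith (PySem.Str.strip line) ";" = true
      · -- terminated import: singleton chunk
        rw [bp_chunks_cons, h3, if_neg (by simp), bp_take_cons,
          if_pos (by simp only [bp_is_prelude_head, List.headD, Bool.or_eq_true]; exact Or.inl (Or.inr h2)),
          List.singleton_append]
        simp only [Bool.not_true]
        exact congrArg _ (ih rest.length (by simp) rest rfl)
      · -- unterminated import: B's chunk absorbs, A's flag run equals the absorption
        rw [Bool.not_eq_true] at h3
        rw [bp_chunks_cons, h3, if_pos (by rw [h2]; rfl), bp_take_cons,
          if_pos (by simp only [bp_is_prelude_head, List.headD, Bool.or_eq_true]; exact Or.inl (Or.inr h2))]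
        simp only [Bool.not_false, goA_true_eq, List.cons_append]
        rw [ih _ (Nat.lt_succ_of_le (bp_absorb_len rest)) _ rfl]
    · -- blank line: singleton chunk
      rw [bp_chunks_cons, if_neg (fun hcc => h2 ((Bool.and_eq_true _ _).mp hcc).1), bp_take_cons,
        if_pos (by simp only [bp_is_prelude_head, List.headD, Bool.or_eq_true]; exact Or.inr h3),
        List.singleton_append]
      exact congrArg _ (ih rest.length (by simp) rest rfl)
    · -- break: B's chunk head fails the prelude test
      rw [bp_chunks_cons, if_neg (fun hcc => h2 ((Bool.and_eq_true _ _).mp hcc).1), bp_take_cons,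
        if_neg (by simp only [bp_is_prelude_head, List.headD, Bool.or_eq_true]; push Not; exact ⟨⟨h1, h2⟩, h3⟩)]

-- ===== VERDICT =====
theorem extract_prelude_spec : Claim_equal_extract_prelude := by
  intro lines _
  unfold Spec_extract_prelude extract_prelude extract_prelude_alt
  rw [goA_false_eq]
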